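-- pv_equiv track=rewrite | github.com/jiwon2121/Algorithm | day14/boong.py | boong
-- ===== SOURCE A (Python) =====
-- def boong(n, m, k, arr):
--     count_dict = {}
--     total = 0
--     for a in arr:
--         key = a // m
--         count_dict[key] = count_dict.get(key, 0) + 1
--
--     for key in sorted(count_dict.keys()):
--         made = key * k
--         if made >= n:
--             return 'Possible'
--
--         total += count_dict[key]
--
--         if total > made:
--             return 'Impossible'
--
--     return 'Possible'
-- ===== SOURCE B (Python) =====
-- def _bisect_right(q, t):
--     # rightmost insertion point of t in the sorted list q (hand-written, bisect not imported by A's module)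
--     lo, hi = 0, len(q)
--     while lo < hi:
--         mid = (lo + hi) // 2
--         if q[mid] <= t:
--             lo = mid + 1
--         else:
--             hi = mid
--     return lo
--
--
-- def boong(n, m, k, arr):
--     # Declarative check: each cumulative count is an independent binary-search query
--     # on the sorted quotient list -- no dict of counts and no running accumulator.
--     q = sorted(a // m for a in arr)
--     keys = sorted(set(q))
--     cut = next((j for j, t in enumerate(keys) if t * k >= n), len(keys))
--     if any(_bisect_right(q, t) > t * k for t in keys[:cut]):
--         return 'Impossible'
--     return 'Possible'
-- ===== Notes on version B (the rewrite author's own statement) =====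
-- stated objective: alternative
-- what changed: Replaces the dict of bucket counts and the accumulating loop over sorted keys by a declarative check: sort the quotients once, cut the distinct keys at the first key with key*k >= n, and test each remaining key independently with a hand-written binary search (bisect_right) giving its cumulative count -- no counter and no running total.
import Mathlib
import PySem

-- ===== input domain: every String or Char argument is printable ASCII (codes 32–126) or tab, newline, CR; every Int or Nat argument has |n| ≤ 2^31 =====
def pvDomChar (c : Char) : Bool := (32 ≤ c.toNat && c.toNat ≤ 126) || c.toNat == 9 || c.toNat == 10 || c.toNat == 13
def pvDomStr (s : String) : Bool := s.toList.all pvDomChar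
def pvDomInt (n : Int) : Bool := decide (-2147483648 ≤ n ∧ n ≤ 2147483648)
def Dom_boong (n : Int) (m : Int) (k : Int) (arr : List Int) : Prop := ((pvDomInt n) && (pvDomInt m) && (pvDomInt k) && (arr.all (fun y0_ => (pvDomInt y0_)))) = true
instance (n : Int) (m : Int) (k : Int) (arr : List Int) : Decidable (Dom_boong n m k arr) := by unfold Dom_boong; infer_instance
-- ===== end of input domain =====

-- B replaces A's dict of bucket counts + accumulating loop over sorted keys by a
-- declarative check: each cumulative count is obtained independently by a hand-written
-- binary search on the sorted quotient list (no counter, no running total).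

-- ===== PORT A =====
def boongLoopA (n : Int) (k : Int) (d : PySem.Dict Int Int) : List Int → Int → String
  | [], _ => "Possible"
  | key :: rest, total =>
    let made := key * k
    if made ≥ n then "Possible"
    else
      -- count_dict[key]: key is one of count_dict's keys, so the lookup always succeeds;
      -- getD with default 0 is exact here.
      let total' := total + d.getD key 0
      if total' > made then "Impossible"
      else boongLoopA n k d rest total'

def boong (n : Int) (m : Int) (k : Int) (arr : List Int) : String :=
  let d := arr.foldl (fun d a =>
    let key := PySem.Int.floordiv a m
    d.insert key (d.getD key 0 + 1)) PySem.Dict.empty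
  boongLoopA n k d (PySem.List.sorted d.keys (fun x => x) false) 0

-- ===== PORT B =====
-- Source B's hand-written _bisect_right loop; lo/hi are nonnegative Python ints, so Nat is
-- exact, and (lo+hi)//2 on nonnegatives is Nat division. q[mid] is always in range in
-- this loop (lo ≤ mid < hi ≤ len q), so getD 0 is exact.
def bisectRgo (q : List Int) (t : Int) (lo hi : Nat) : Nat :=
  if _h : lo < hi then
    let mid := (lo + hi) / 2
    if q.getD mid 0 ≤ t then bisectRgo q t (mid + 1) hi
    else bisectRgo q t lo mid
  else lo
termination_by hi - lo
decreasing_by all_goals omega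

def pyBisectRight (q : List Int) (t : Int) : Nat := bisectRgo q t 0 q.length

def boong_alt (n : Int) (m : Int) (k : Int) (arr : List Int) : String :=
  let q := PySem.List.sorted (arr.map (fun a => PySem.Int.floordiv a m)) (fun x => x) false
  let keys := PySem.List.sorted (PySem.Set.ofList q) (fun x => x) false
  -- next((j for j, t in enumerate(keys) if t*k >= n), len(keys))
  let cut := keys.findIdx (fun t => decide (t * k ≥ n))
  if (keys.take cut).any (fun t => decide ((pyBisectRight q t : Int) > t * k)) then "Impossible"
  else "Possible"

-- ===== PRECONDITION & SPEC =====
-- Pre_ excludes m = 0 with a nonempty arr: there Python's a // m raises ZeroDivisionError.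
def Pre_boong (n : Int) (m : Int) (k : Int) (arr : List Int) : Prop := m ≠ 0 ∨ arr = []
instance (n : Int) (m : Int) (k : Int) (arr : List Int) : Decidable (Pre_boong n m k arr) := by unfold Pre_boong; infer_instance
def pvWitness_boong : Int × Int × Int × List Int := (10, 2, 3, [4, 5, 6, 7, 8])

def Spec_boong (n : Int) (m : Int) (k : Int) (arr : List Int) (out : String) : Prop := out = boong_alt n m k arr
instance (n : Int) (m : Int) (k : Int) (arr : List Int) (out : String) : Decidable (Spec_boong n m k arr out) := by unfold Spec_boong; infer_instance

-- ===== CLAIM (what is proved, stated in full; the proofs are below) =====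
def Claim_equal_boong : Prop := ∀ (n : Int) (m : Int) (k : Int) (arr : List Int), Dom_boong n m k arr → Pre_boong n m k arr → Spec_boong n m k arr (boong n m k arr)

-- ===== LEMMAS AND PROOFS =====

-- sorted list: getD is monotone on in-range indices
theorem sorted_getD_mono {q : List Int} (hq : q.Pairwise (· ≤ ·)) {i j : Nat}
    (hij : i ≤ j) (hj : j < q.length) : q.getD i 0 ≤ q.getD j 0 := by
  rcases Nat.eq_or_lt_of_le hij with rfl | hlt
  · exact le_refl _
  · have := (List.pairwise_iff_getElem.mp hq) i j (by omega) hj hlt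
    rw [List.getD_eq_getElem q 0 (by omega), List.getD_eq_getElem q 0 hj]
    exact this

-- the binary search returns a cut point: everything before it is ≤ t, everything after is > t
theorem bisectRgo_props (q : List Int) (t : Int) (hq : q.Pairwise (· ≤ ·)) :
    ∀ (lo hi : Nat), lo ≤ hi → hi ≤ q.length →
    (∀ i, i < lo → q.getD i 0 ≤ t) →
    (∀ i, hi ≤ i → i < q.length → ¬ q.getD i 0 ≤ t) →
    lo ≤ bisectRgo q t lo hi ∧ bisectRgo q t lo hi ≤ hi ∧
    (∀ i, i < bisectRgo q t lo hi → q.getD i 0 ≤ t) ∧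
    (∀ i, bisectRgo q t lo hi ≤ i → i < q.length → ¬ q.getD i 0 ≤ t) := by
  intro lo hi
  induction hn : hi - lo using Nat.strong_induction_on generalizing lo hi with
  | _ fuel ih =>
  intro hlohi hhi hlow hhigh
  rw [bisectRgo]
  by_cases h : lo < hi
  · simp only [h, dif_pos]
    have hmid1 : lo ≤ (lo + hi) / 2 := by omega
    have hmid2 : (lo + hi) / 2 < hi := by omega
    by_cases hle : q.getD ((lo + hi) / 2) 0 ≤ t
    · simp only [hle, if_pos]
      obtain ⟨ha, hb, hc, hd⟩ := ih (hi - ((lo + hi) / 2 + 1)) (by omega) ((lo + hi) / 2 + 1) hi rfl (by omega) hhi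
        (fun i hi' => le_trans (sorted_getD_mono hq (by omega) (by omega)) hle) hhigh
      exact ⟨by omega, hb, hc, hd⟩
    · simp only [hle, if_neg, not_false_iff]
      obtain ⟨ha, hb, hc, hd⟩ := ih ((lo + hi) / 2 - lo) (by omega) lo ((lo + hi) / 2) rfl (by omega) (by omega) hlow
        (fun i hi1 hi2 hcontra => hle (le_trans (sorted_getD_mono hq hi1 hi2) hcontra))
      exact ⟨ha, by omega, hc, hd⟩
  · simp only [h, dif_neg, not_false_iff]
    have : lo = hi := by omega
    exact ⟨le_refl _, by omega, hlow, by rw [this]; exact hhigh⟩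

-- a cut point with those properties is exactly countP (· ≤ t)
theorem countP_of_cut (q : List Int) (p : Int → Bool) (r : Nat) (hr : r ≤ q.length)
    (h1 : ∀ i, i < r → p (q.getD i 0))
    (h2 : ∀ i, r ≤ i → i < q.length → ¬ p (q.getD i 0)) :
    q.countP p = r := by
  have hsplit := List.take_append_drop r q
  calc q.countP p = (q.take r ++ q.drop r).countP p := by rw [hsplit]
    _ = (q.take r).countP p + (q.drop r).countP p := by rw [List.countP_append]
    _ = r := by
        have hta : (q.take r).countP p = (q.take r).length := by
          rw [List.countP_eq_length]
          intro a ha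
          obtain ⟨i, hi, hgi⟩ := List.mem_iff_getElem.mp ha
          have hil : i < q.length := by
            simp [List.length_take] at hi; omega
          have : a = q.getD i 0 := by
            rw [List.getD_eq_getElem q 0 hil, ← hgi, List.getElem_take]
          rw [this]
          exact h1 i (by simp [List.length_take] at hi; omega)
        have htd : (q.drop r).countP p = 0 := by
          rw [List.countP_eq_zero]
          intro a ha
          obtain ⟨i, hi, hgi⟩ := List.mem_iff_getElem.mp ha
          have hil : r + i < q.length := by
            simp [List.length_drop] at hi; omega
          have : a = q.getD (r + i) 0 := by
            rw [List.getD_eq_getElem q 0 hil, ← hgi, List.getElem_drop]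
          rw [this]
          exact h2 (r + i) (by omega) hil
        rw [hta, htd, List.length_take]
        omega

theorem pyBisectRight_eq_countP (q : List Int) (t : Int) (hq : q.Pairwise (· ≤ ·)) :
    pyBisectRight q t = q.countP (fun x => decide (x ≤ t)) := by
  have h := bisectRgo_props q t hq 0 q.length (Nat.zero_le _) (le_refl _)
    (by intro i hi; omega) (by intro i hi1 hi2; omega)
  exact (countP_of_cut q _ _ h.2.1
    (fun i hi => by simpa using h.2.2.1 i hi)
    (fun i hi1 hi2 => by simpa using h.2.2.2 i hi1 hi2)).symm

-- split a ≤-count at an intermediate bound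
theorem countP_le_split (q : List Int) (b t : Int) (hbt : b ≤ t) :
    q.countP (fun x => decide (x ≤ t)) =
      q.countP (fun x => decide (x ≤ b)) + q.countP (fun x => (decide (b < x) && decide (x ≤ t))) := by
  induction q with
  | nil => simp
  | cons a q' ih =>
    simp only [List.countP_cons, ih]
    by_cases h1 : a ≤ b <;> by_cases h2 : a ≤ t <;>
      simp [h1, h2, show b < a ↔ ¬ a ≤ b by omega] <;> omega

-- A's loop over the strictly increasing tail of keys equals B's cut/any test over it
theorem loopA_eq_any (n k : Int) (d : PySem.Dict Int Int) (q : List Int) :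
    ∀ (s : List Int) (b total : Int),
    s.Pairwise (· < ·) →
    (∀ x, x ∈ s ↔ x ∈ q ∧ b < x) →
    total = (q.countP (fun x => decide (x ≤ b)) : Int) →
    (∀ t, d.getD t 0 = (q.count t : Int)) →
    boongLoopA n k d s total =
      (if (s.take (s.findIdx (fun t => decide (t * k ≥ n)))).any
            (fun t => decide (((q.countP (fun x => decide (x ≤ t)) : Nat) : Int) > t * k))
       then "Impossible" else "Possible") := by
  intro s
  induction s with
  | nil => intro b total _ _ _ _; simp [boongLoopA]
  | cons t rest ih =>
    intro b total hs hmem htot hcnt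
    obtain ⟨ht_lt, hrest⟩ := List.pairwise_cons.mp hs
    have hbt : b < t := ((hmem t).mp (by simp)).2
    -- the cumulative count at key t
    have hcount : (q.countP (fun x => decide (x ≤ t)) : Int) = total + d.getD t 0 := by
      rw [hcnt t, htot, countP_le_split q b t (by omega)]
      have hmid : q.countP (fun x => (decide (b < x) && decide (x ≤ t))) = q.count t := by
        rw [List.count_eq_countP]
        apply List.countP_congr
        intro x hx
        simp only [Bool.and_eq_true, decide_eq_true_eq, beq_iff_eq]
        constructor
        · rintro ⟨hb, hle⟩
          have hxs : x ∈ t :: rest := (hmem x).mpr ⟨hx, hb⟩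
          rcases List.mem_cons.mp hxs with h | h
          · exact h
          · exact absurd (ht_lt x h) (by omega)
        · rintro rfl; exact ⟨hbt, le_refl _⟩
      rw [hmid]; push_cast; ring
    by_cases hfeas : t * k ≥ n
    · have : List.findIdx (fun t => decide (t * k ≥ n)) (t :: rest) = 0 := by
        rw [List.findIdx_cons]; simp [hfeas]
      rw [this]
      simp [boongLoopA, hfeas]
    · have hidx : List.findIdx (fun t => decide (t * k ≥ n)) (t :: rest) =
          List.findIdx (fun t => decide (t * k ≥ n)) rest + 1 := by
        rw [List.findIdx_cons]; simp [hfeas]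
      rw [hidx, List.take_succ_cons, List.any_cons]
      by_cases himp : total + d.getD t 0 > t * k
      · have : decide (((q.countP (fun x => decide (x ≤ t)) : Nat) : Int) > t * k) = true := by
          simp only [decide_eq_true_eq]; omega
        rw [this]
        simp [boongLoopA, hfeas, himp]
      · have hfalse : decide (((q.countP (fun x => decide (x ≤ t)) : Nat) : Int) > t * k) = false := by
          simp only [decide_eq_false_iff_not]; omega
        rw [hfalse, Bool.false_or]
        have hstep : boongLoopA n k d (t :: rest) total = boongLoopA n k d rest (total + d.getD t 0) := by
          simp [boongLoopA, hfeas, himp]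
        rw [hstep, ih t (total + d.getD t 0) hrest ?_ (by omega) hcnt]
        intro x
        constructor
        · intro hx
          have := (hmem x).mp (List.mem_cons_of_mem _ hx)
          exact ⟨this.1, ht_lt x hx⟩
        · rintro ⟨hx, hlt⟩
          have : x ∈ t :: rest := (hmem x).mpr ⟨hx, by omega⟩
          rcases List.mem_cons.mp this with h | h
          · omega
          · exact h

theorem foldl_insert_eq_counter_map (f : Int → Int) (arr : List Int) :
    arr.foldl (fun d a => d.insert (f a) (d.getD (f a) 0 + 1)) PySem.Dict.empty
      = PySem.Dict.counter (arr.map f) := by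
  rw [← PySem.Dict.foldl_insert_getD_add_one_eq_counter, List.foldl_map]

-- the two key lists (sorted set of the raw quotients / of the sorted quotients) coincide
theorem keys_sorted_eq (qm : List Int) :
    PySem.List.sorted (PySem.Set.ofList qm) (fun x => x) false
      = PySem.List.sorted (PySem.Set.ofList (PySem.List.sorted qm (fun x => x) false)) (fun x => x) false := by
  have h1 : (PySem.List.sorted (PySem.Set.ofList (PySem.List.sorted qm (fun x => x) false)) (fun x => x) false).Perm
      (PySem.Set.ofList qm) := by
    refine List.Perm.trans (PySem.List.sorted_perm _ _ _) ?_
    rw [List.perm_ext_iff_of_nodup (PySem.Set.nodup_ofList _) (PySem.Set.nodup_ofList _)]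
    intro a
    rw [PySem.Set.mem_ofList, PySem.Set.mem_ofList, PySem.List.mem_sorted]
  exact PySem.List.sorted_eq_of_perm_of_pairwise_lt _ _ _ h1
    (PySem.List.sorted_ofList_pairwise_lt (PySem.List.sorted qm (fun x => x) false))

-- ===== VERDICT (by name: the statement is the Claim_ definition above) =====
theorem boong_spec : Claim_equal_boong := by
  intro n m k arr _ _
  unfold Spec_boong boong boong_alt
  simp only
  set qm := arr.map (fun a => PySem.Int.floordiv a m) with hqm
  set q := PySem.List.sorted qm (fun x => x) false with hq
  have hq_sorted : q.Pairwise (· ≤ ·) := by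
    simpa using PySem.List.sorted_pairwise qm (fun x => x)
  rw [foldl_insert_eq_counter_map (fun a => PySem.Int.floordiv a m) arr, PySem.Dict.keys_counter,
    keys_sorted_eq qm]
  set keys := PySem.List.sorted (PySem.Set.ofList q) (fun x => x) false with hkeys
  have hkeys_lt : keys.Pairwise (· < ·) := PySem.List.sorted_ofList_pairwise_lt _
  have hkeys_mem : ∀ x, x ∈ keys ↔ x ∈ q := by
    intro x
    rw [hkeys, PySem.List.mem_sorted, PySem.Set.mem_ofList]
  have hcnt : ∀ t, (PySem.Dict.counter qm).getD t 0 = (q.count t : Int) := by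
    intro t
    rw [PySem.Dict.getD_counter, (PySem.List.sorted_perm qm (fun x => x) false).count_eq]
  have hbisect : ∀ t, pyBisectRight q t = q.countP (fun x => decide (x ≤ t)) :=
    fun t => pyBisectRight_eq_countP q t hq_sorted
  have hb : ∃ b : Int, ∀ x ∈ q, b < x := by
    cases hqe : q with
    | nil => exact ⟨0, by simp⟩
    | cons c tail =>
      refine ⟨c - 1, ?_⟩
      intro x hx
      have hsrt : PySem.List.sorted qm (fun x => x) false = c :: tail := by rw [← hq]; exact hqe
      have hxm : x ∈ qm := by
        rw [← PySem.List.mem_sorted qm (fun x => x) false, ← hq, hqe]; exact hx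
      have hc : c ≤ x := PySem.List.key_head_sorted_le qm (fun x => x) hsrt x hxm
      omega
  obtain ⟨b, hb⟩ := hb
  rw [show (fun t => decide ((pyBisectRight q t : Int) > t * k))
        = (fun t => decide (((q.countP (fun x => decide (x ≤ t)) : Nat) : Int) > t * k))
      from funext (fun t => by rw [hbisect t])]
  apply loopA_eq_any n k (PySem.Dict.counter qm) q keys b 0 hkeys_lt
  · intro x
    rw [hkeys_mem x]
    exact ⟨fun hx => ⟨hx, hb x hx⟩, fun h => h.1⟩
  · have h0 : q.countP (fun x => decide (x ≤ b)) = 0 := by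
      rw [List.countP_eq_zero]
      intro x hx
      have := hb x hx
      simp only [decide_eq_true_eq]
      omega
    rw [h0]; rfl
  · exact hcnt
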